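-- pv_equiv track=rewrite | github.com/themane04/python | Algorithmen/Algorithm Challenges/AB04/the_snake.py | snake_function
-- ===== SOURCE A (Python) =====
-- def snake_function(side_length):
--     snake_size = 1
--     eating_tracker = -1
--     total_blocks = side_length * side_length
--
--     while snake_size <= total_blocks:
--         snake_size *= 2
--         eating_tracker += 1
--     return eating_tracker
-- ===== SOURCE B (Python) =====
-- def snake_function(side_length):
--     return (side_length * side_length).bit_length() - 1
-- ===== Notes on version B (the rewrite author's own statement) =====
-- stated objective: simpler
-- what changed: Replaces the doubling loop and accumulator by the closed form bit_length(side_length^2) - 1, i.e. floor(log2) computed directly, one arithmetic expression.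
import Mathlib
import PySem

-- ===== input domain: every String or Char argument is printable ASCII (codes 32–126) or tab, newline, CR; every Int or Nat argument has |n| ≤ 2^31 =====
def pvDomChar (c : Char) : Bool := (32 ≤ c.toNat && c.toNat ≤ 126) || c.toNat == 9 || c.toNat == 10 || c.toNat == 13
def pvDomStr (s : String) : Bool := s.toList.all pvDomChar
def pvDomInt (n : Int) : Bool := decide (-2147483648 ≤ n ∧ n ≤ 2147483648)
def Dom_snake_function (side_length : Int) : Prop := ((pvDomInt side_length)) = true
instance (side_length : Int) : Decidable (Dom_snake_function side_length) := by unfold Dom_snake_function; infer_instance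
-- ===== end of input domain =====

-- B replaces A's doubling loop by the closed form bit_length(side_length^2) - 1 (simpler, no loop).

-- ===== PORT A =====
-- the while loop: snake_size (kept as a Nat, it is always a positive power of two) doubles,
-- eating_tracker counts; the '0 < s' conjunct is a totality guard only (always true on reachable states)
def snakeLoopA (t : Int) (s : Nat) (e : Int) : Int :=
  if h : 0 < s ∧ (s : Int) ≤ t then snakeLoopA t (2 * s) (e + 1) else e
termination_by t.toNat + 1 - s
decreasing_by
  have h1 : (s : Int) ≤ t := h.2
  have h2 : s ≤ t.toNat := by omega
  omega

def snake_function (side_length : Int) : Int :=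
  snakeLoopA (side_length * side_length) 1 (-1)

-- ===== PORT B =====
-- (side_length*side_length).bit_length() - 1; for a nonnegative int m, bit_length m = if m = 0 then 0 else log2 m + 1
def snake_function_alt (side_length : Int) : Int :=
  let t : Nat := (side_length * side_length).toNat
  (if t = 0 then 0 else (Nat.log2 t : Int) + 1) - 1

-- ===== PRECONDITION & SPEC =====
def Spec_snake_function (side_length : Int) (out : Int) : Prop := out = snake_function_alt side_length
instance (side_length : Int) (out : Int) : Decidable (Spec_snake_function side_length out) := by unfold Spec_snake_function; infer_instance

-- ===== CLAIM (what is proved, stated in full; the proofs are below) =====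
def Claim_equal_snake_function : Prop := ∀ (side_length : Int), Dom_snake_function side_length → Spec_snake_function side_length (snake_function side_length)

-- ===== LEMMAS AND PROOFS =====

theorem snakeLoopA_pow (t : Nat) :
    ∀ (d k : Nat) (e : Int), t.log2 + 1 - k = d → 2 ^ k ≤ t →
      snakeLoopA (t : Int) (2 ^ k) e = e + (t.log2 : Int) - k + 1 := by
  intro d
  induction d with
  | zero =>
    intro k e hd hk
    have ht : t ≠ 0 := by
      have : 1 ≤ 2 ^ k := Nat.one_le_two_pow
      omega
    have := (Nat.le_log2 ht).mpr hk
    omega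
  | succ d ih =>
    intro k e hd hk
    have ht : t ≠ 0 := by
      intro h0; subst h0; exact Nat.not_succ_le_zero _ (Nat.le_trans (Nat.one_le_two_pow) hk)
    have hklog : k ≤ t.log2 := (Nat.le_log2 ht).mpr hk
    rw [snakeLoopA]
    have hcond : 0 < 2 ^ k ∧ ((2 ^ k : Nat) : Int) ≤ (t : Int) := by
      constructor
      · positivity

      · exact_mod_cast hk
    rw [dif_pos hcond]
    have h2s : 2 * 2 ^ k = 2 ^ (k + 1) := by ring
    rw [h2s]
    by_cases hk1 : 2 ^ (k + 1) ≤ t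
    · have hklog1 : k + 1 ≤ t.log2 := (Nat.le_log2 ht).mpr hk1
      have := ih (k + 1) (e + 1) (by omega) hk1
      rw [this]
      push_cast
      ring
    · have hlt : t.log2 < k + 1 := by
        by_contra hle
        exact hk1 ((Nat.le_log2 ht).mp (by omega))
      have hlogk : t.log2 = k := by omega
      rw [snakeLoopA]
      rw [dif_neg]
      · rw [hlogk]; ring
      · intro hc
        exact hk1 (by exact_mod_cast hc.2)

-- ===== VERDICT (by name: the statement is the Claim_ definition above) =====
theorem snake_function_spec : Claim_equal_snake_function := by
  intro n _
  unfold Spec_snake_function snake_function snake_function_alt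
  have hnn : (0 : Int) ≤ n * n := mul_self_nonneg n
  by_cases h0 : n * n = 0
  · rw [h0]
    rw [snakeLoopA]
    norm_num
  · have ht : (n * n).toNat ≠ 0 := by omega
    have hcast : ((n * n).toNat : Int) = n * n := Int.toNat_of_nonneg hnn
    have h1 : (2 : Nat) ^ 0 ≤ (n * n).toNat := by
      simp; omega
    have := snakeLoopA_pow (n * n).toNat ((n * n).toNat.log2 + 1) 0 (-1) rfl h1
    rw [hcast] at this
    simp only [pow_zero] at this
    rw [this]
    simp [ht]
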